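-- pv_equiv track=rewrite | github.com/LNQuynh1009/Python---PTIT | So thuan nghich chan.py | check
-- ===== SOURCE A (Python) =====
-- def check(n):
--     for i in n:
--         if i != '2' and i != '4' and i != '8' and i != '6' and i != '0':
--             return False
--     for i in range(0, int(len(n)/2)):
--         if n[i] != n[len(n)-i-1]:
--             return False
--     return True
-- ===== SOURCE B (Python) =====
-- def check(n):
--     L = len(n)
--     for i in range((L + 1) // 2):
--         a = n[i]
--         b = n[L - 1 - i]
--         if a not in '02468' or b not in '02468' or a != b:
--             return False
--     return True
-- ===== Notes on version B (the rewrite author's own statement) =====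
-- stated objective: simpler
-- what changed: fuses A's two sequential scans (all-digits-even, then half-length palindrome check) into one loop over the ceiling half that checks evenness of both mirrored characters and their equality at once
import Mathlib
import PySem

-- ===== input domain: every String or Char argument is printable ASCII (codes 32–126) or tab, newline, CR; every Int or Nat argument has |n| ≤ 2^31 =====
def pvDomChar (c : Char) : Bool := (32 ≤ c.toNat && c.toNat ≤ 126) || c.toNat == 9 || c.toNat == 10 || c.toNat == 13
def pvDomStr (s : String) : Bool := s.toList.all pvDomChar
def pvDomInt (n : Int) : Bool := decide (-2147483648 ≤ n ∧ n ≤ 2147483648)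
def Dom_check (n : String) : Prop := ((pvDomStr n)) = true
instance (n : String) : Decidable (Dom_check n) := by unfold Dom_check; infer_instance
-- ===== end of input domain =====

-- B fuses A's two sequential scans (all-even, then half-length palindrome) into one
-- loop over the ceiling half checking evenness of both mirrored characters and equality.

-- ===== PORT A =====
-- A's first loop: return False on the first char that is none of '2','4','8','6','0'.
def checkEvenLoop : List Char → Bool
  | [] => true
  | c :: rest =>
    if !(c == '2') && !(c == '4') && !(c == '8') && !(c == '6') && !(c == '0') then false
    else checkEvenLoop rest

-- A's second loop over range(0, len//2); indices are always in range, so getD is exact.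
def checkPalLoop (cs : List Char) : List Nat → Bool
  | [] => true
  | i :: rest =>
    if !(cs.getD i ' ' == cs.getD (cs.length - i - 1) ' ') then false
    else checkPalLoop cs rest

def check (n : String) : Bool :=
  let cs := n.toList
  -- sequential early returns: first loop failing yields False before the second runs
  checkEvenLoop cs && checkPalLoop cs (List.range (cs.length / 2))

-- ===== PORT B =====
def checkFusedLoop (cs : List Char) : List Nat → Bool
  | [] => true
  | i :: rest =>
    let a := cs.getD i ' '
    let b := cs.getD (cs.length - 1 - i) ' '
    if !(a ∈ ['0','2','4','6','8']) || !(b ∈ ['0','2','4','6','8']) || !(a == b) then false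
    else checkFusedLoop cs rest

def check_alt (n : String) : Bool :=
  let cs := n.toList
  checkFusedLoop cs (List.range ((cs.length + 1) / 2))

-- ===== PRECONDITION & SPEC =====
def Spec_check (n : String) (out : Bool) : Prop := out = check_alt n
instance (n : String) (out : Bool) : Decidable (Spec_check n out) := by unfold Spec_check; infer_instance

-- ===== CLAIM (what is proved, stated in full; the proofs are below) =====
def Claim_equal_check : Prop := ∀ (n : String), Dom_check n → Spec_check n (check n)

-- ===== LEMMAS AND PROOFS =====
def evenC (c : Char) : Bool := c == '2' || c == '4' || c == '8' || c == '6' || c == '0'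

theorem checkEvenLoop_eq_all (cs : List Char) : checkEvenLoop cs = cs.all evenC := by
  induction cs with
  | nil => rfl
  | cons c rest ih =>
    simp only [checkEvenLoop, List.all_cons, ih]
    cases h2 : (c == '2') <;> cases h4 : (c == '4') <;> cases h8 : (c == '8') <;>
      cases h6 : (c == '6') <;> cases h0 : (c == '0') <;> simp [evenC, h2, h4, h8, h6, h0]

theorem checkPalLoop_eq_all (cs : List Char) (l : List Nat) :
    checkPalLoop cs l = l.all (fun i => cs.getD i ' ' == cs.getD (cs.length - i - 1) ' ') := by
  induction l with
  | nil => rfl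
  | cons i rest ih =>
    simp only [checkPalLoop, List.all_cons, ih]
    cases h : (cs.getD i ' ' == cs.getD (cs.length - i - 1) ' ') <;> simp_all

theorem checkFusedLoop_eq_all (cs : List Char) (l : List Nat) :
    checkFusedLoop cs l = l.all (fun i =>
      decide (cs.getD i ' ' ∈ ['0','2','4','6','8']) &&
      decide (cs.getD (cs.length - 1 - i) ' ' ∈ ['0','2','4','6','8']) &&
      (cs.getD i ' ' == cs.getD (cs.length - 1 - i) ' ')) := by
  induction l with
  | nil => rfl
  | cons i rest ih =>
    simp only [checkFusedLoop, List.all_cons, ih]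
    by_cases ha : cs.getD i ' ' ∈ ['0','2','4','6','8'] <;>
      by_cases hb : cs.getD (cs.length - 1 - i) ' ' ∈ ['0','2','4','6','8'] <;>
      cases he : (cs.getD i ' ' == cs.getD (cs.length - 1 - i) ' ') <;>
      simp_all

theorem evenC_iff_mem (c : Char) : evenC c = true ↔ c ∈ (['0','2','4','6','8'] : List Char) := by
  simp only [evenC, Bool.or_eq_true, beq_iff_eq, List.mem_cons, List.not_mem_nil, or_false]
  tauto

theorem key (cs : List Char) :
    (cs.all evenC && (List.range (cs.length / 2)).all
        (fun i => cs.getD i ' ' == cs.getD (cs.length - i - 1) ' ')) =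
    (List.range ((cs.length + 1) / 2)).all (fun i =>
      decide (cs.getD i ' ' ∈ ['0','2','4','6','8']) &&
      decide (cs.getD (cs.length - 1 - i) ' ' ∈ ['0','2','4','6','8']) &&
      (cs.getD i ' ' == cs.getD (cs.length - 1 - i) ' ')) := by
  set L := cs.length with hL
  apply Bool.eq_iff_iff.mpr
  simp only [Bool.and_eq_true, List.all_eq_true, List.mem_range, beq_iff_eq, decide_eq_true_eq]
  constructor
  · rintro ⟨hev, hpal⟩ i hi
    have hiL : i < L := by omega
    have hmL : L - 1 - i < L := by omega
    have ha : cs.getD i ' ' ∈ (['0','2','4','6','8'] : List Char) := by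
      rw [List.getD_eq_getElem cs ' ' (by omega)]
      exact (evenC_iff_mem _).mp (hev _ (List.getElem_mem _))
    have hb : cs.getD (L - 1 - i) ' ' ∈ (['0','2','4','6','8'] : List Char) := by
      rw [List.getD_eq_getElem cs ' ' (by omega)]
      exact (evenC_iff_mem _).mp (hev _ (List.getElem_mem _))
    refine ⟨⟨ha, hb⟩, ?_⟩
    by_cases hhalf : i < L / 2
    · have := hpal i hhalf
      rwa [show L - i - 1 = L - 1 - i by omega] at this
    · have : L - 1 - i = i := by omega
      rw [this]
  · intro h
    constructor
    · intro c hc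
      obtain ⟨j, hj, rfl⟩ := List.mem_iff_getElem.mp hc
      rw [evenC_iff_mem]
      by_cases hjh : j < (L + 1) / 2
      · have := (h j hjh).1.1
        rwa [List.getD_eq_getElem cs ' ' (by omega)] at this
      · have hij : L - 1 - (L - 1 - j) = j := by omega
        have hlt : L - 1 - j < (L + 1) / 2 := by omega
        have := (h _ hlt).1.2
        rw [hij, List.getD_eq_getElem cs ' ' (by omega)] at this
        exact this
    · intro i hi
      have hlt : i < (L + 1) / 2 := by omega
      have := (h i hlt).2
      rwa [show L - 1 - i = L - i - 1 by omega] at this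

-- ===== VERDICT (by name: the statement is the Claim_ definition above) =====
theorem check_spec : Claim_equal_check := by
  intro n _
  unfold Spec_check check check_alt
  simp only [checkEvenLoop_eq_all, checkPalLoop_eq_all, checkFusedLoop_eq_all]
  exact key n.toList
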